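-- pv_equiv track=rewrite | github.com/gen-git-26/FinSight_App | datasources/__init__.py | _is_crypto
-- ===== SOURCE A (Python) =====
-- def _is_crypto(symbol: str) -> bool:
--     """Check if symbol is cryptocurrency."""
--     crypto_indicators = [
--         '-usd', '-usdt', 'btc', 'eth', 'sol', 'doge',
--         'xrp', 'ada', 'dot', 'avax', 'link', 'matic',
--         'bitcoin', 'ethereum', 'solana'
--     ]
--     symbol_lower = symbol.lower()
--     return any(ind in symbol_lower for ind in crypto_indicators)
-- ===== SOURCE B (Python) =====
-- def _is_crypto(symbol: str) -> bool:
--     """Check if symbol is cryptocurrency."""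
--     inds = ('-usd', '-usdt', 'btc', 'eth', 'sol', 'doge', 'xrp', 'ada',
--             'dot', 'avax', 'link', 'matic', 'bitcoin', 'ethereum', 'solana')
--     s = symbol.lower()
--     # single left-to-right pass: does any indicator start at position i?
--     return any(s.startswith(inds, i) for i in range(len(s)))
-- ===== Notes on version B (the rewrite author's own statement) =====
-- stated objective: alternative
-- what changed: A scans the whole string once per indicator (any substring-containment test per indicator); B makes a single left-to-right pass over the string and at each position asks whether some indicator starts there (startswith with an offset).
import Mathlib
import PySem

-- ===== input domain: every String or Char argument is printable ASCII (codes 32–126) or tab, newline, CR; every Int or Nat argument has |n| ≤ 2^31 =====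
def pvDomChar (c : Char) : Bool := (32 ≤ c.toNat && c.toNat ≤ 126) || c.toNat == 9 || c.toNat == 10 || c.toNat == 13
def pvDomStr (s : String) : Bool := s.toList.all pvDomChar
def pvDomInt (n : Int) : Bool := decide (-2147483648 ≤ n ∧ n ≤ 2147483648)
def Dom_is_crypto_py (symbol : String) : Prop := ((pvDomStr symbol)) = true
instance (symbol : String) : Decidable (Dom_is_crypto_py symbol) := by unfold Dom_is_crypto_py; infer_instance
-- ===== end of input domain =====

-- B replaces A's per-indicator substring scans by a single left-to-right pass checking
-- at each position whether some indicator starts there (objective: alternative).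

-- ===== PORT A =====
def is_crypto_py (symbol : String) : Bool :=
  let crypto_indicators : List String :=
    ["-usd", "-usdt", "btc", "eth", "sol", "doge",
     "xrp", "ada", "dot", "avax", "link", "matic",
     "bitcoin", "ethereum", "solana"]
  let symbol_lower := PySem.Str.lower symbol
  crypto_indicators.any (fun ind => PySem.Str.isIn ind symbol_lower)

-- ===== PORT B =====
def altIndicators : List (List Char) :=
  ["-usd".toList, "-usdt".toList, "btc".toList, "eth".toList, "sol".toList, "doge".toList,
   "xrp".toList, "ada".toList, "dot".toList, "avax".toList, "link".toList, "matic".toList,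
   "bitcoin".toList, "ethereum".toList, "solana".toList]

-- the loop 'for i in range(len(s)): if any(s.startswith(ind, i) …)' as recursion over suffixes
def altScan : List Char → Bool
  | [] => false
  | c :: rest =>
      if altIndicators.any (fun ind => PySem.Chars.startswith (c :: rest) ind) then true
      else altScan rest

def is_crypto_py_alt (symbol : String) : Bool :=
  altScan (PySem.Str.lower symbol).toList

-- ===== PRECONDITION & SPEC =====
def Spec_is_crypto_py (symbol : String) (out : Bool) : Prop := out = is_crypto_py_alt symbol
instance (symbol : String) (out : Bool) : Decidable (Spec_is_crypto_py symbol out) := by unfold Spec_is_crypto_py; infer_instance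

-- ===== CLAIM (what is proved, stated in full; the proofs are below) =====
def Claim_equal_is_crypto_py : Prop := ∀ (symbol : String), Dom_is_crypto_py symbol → Spec_is_crypto_py symbol (is_crypto_py symbol)

-- ===== LEMMAS AND PROOFS =====

lemma altScan_iff (t : List Char) :
    altScan t = true ↔ ∃ ind ∈ altIndicators, ind <:+: t := by
  induction t with
  | nil =>
      simp only [altScan]
      constructor
      · intro h; cases h
      · rintro ⟨ind, hmem, hinf⟩
        have : ind = [] := List.eq_nil_of_infix_nil hinf
        subst this
        revert hmem; decide
  | cons c rest ih =>
      simp only [altScan]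
      by_cases h : altIndicators.any (fun ind => PySem.Chars.startswith (c :: rest) ind) = true
      · rw [if_pos h]
        simp only [true_iff]
        rcases List.any_eq_true.mp h with ⟨ind, hmem, hsw⟩
        exact ⟨ind, hmem, ((PySem.Chars.startswith_iff _ _).mp hsw).isInfix⟩
      · rw [if_neg h, ih]
        constructor
        · rintro ⟨ind, hmem, hinf⟩
          exact ⟨ind, hmem, (List.infix_cons_iff).mpr (Or.inr hinf)⟩
        · rintro ⟨ind, hmem, hinf⟩
          rcases List.infix_cons_iff.mp hinf with hp | hi
          · exact absurd (List.any_eq_true.mpr ⟨ind, hmem,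
              (PySem.Chars.startswith_iff _ _).mpr hp⟩) h
          · exact ⟨ind, hmem, hi⟩

lemma a_lists_eq :
    (["-usd", "-usdt", "btc", "eth", "sol", "doge",
      "xrp", "ada", "dot", "avax", "link", "matic",
      "bitcoin", "ethereum", "solana"] : List String).map String.toList = altIndicators := by
  decide

lemma a_iff (symbol : String) :
    is_crypto_py symbol = true ↔
      ∃ ind ∈ altIndicators, ind <:+: PySem.Chars.lower symbol.toList := by
  simp only [is_crypto_py, List.any_eq_true, PySem.Str.isIn_iff_infix, PySem.Str.toList_lower]
  rw [← a_lists_eq]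
  constructor
  · rintro ⟨ind, hm, hi⟩
    exact ⟨ind.toList, List.mem_map_of_mem hm, hi⟩
  · rintro ⟨l, hm, hi⟩
    rcases List.mem_map.mp hm with ⟨ind, hind, rfl⟩
    exact ⟨ind, hind, hi⟩

-- ===== VERDICT (by name: the statement is the Claim_ definition above) =====
theorem is_crypto_py_spec : Claim_equal_is_crypto_py := by
  intro symbol _
  unfold Spec_is_crypto_py is_crypto_py_alt
  rw [PySem.Str.toList_lower]
  rcases hb : altScan (PySem.Chars.lower symbol.toList) with _ | _
  · by_contra h
    simp only [Bool.not_eq_false] at h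
    have hx := (altScan_iff _).mpr ((a_iff symbol).mp h)
    rw [hb] at hx
    cases hx
  · exact (a_iff symbol).mpr ((altScan_iff _).mp hb)
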